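-- pv_equiv track=rewrite | github.com/oh-yeah-zzy/Aegis | app/core/rbac.py | check_permission_with_wildcard
-- ===== SOURCE A (Python) =====
-- def check_permission_with_wildcard(
--     user_permissions: set[str],
--     required_permission: str,
-- ) -> bool:
--     """
--     检查权限（支持通配符）
--
--     权限码格式：{service}:{resource}:{action}
--     支持通配符：
--     - aegis:* 匹配所有 aegis 服务的权限
--     - aegis:users:* 匹配 aegis:users 下的所有操作
--     - *:*:read 匹配所有服务的读取权限
--
--     Args:
--         user_permissions: 用户拥有的权限集合
--         required_permission: 所需的权限
--
--     Returns:
--         是否通过权限检查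
--     """
--     # 直接匹配
--     if required_permission in user_permissions:
--         return True
--
--     # 解析权限码
--     required_parts = required_permission.split(":")
--
--     for user_perm in user_permissions:
--         user_parts = user_perm.split(":")
--
--         # 确保部分数量相同
--         if len(user_parts) != len(required_parts):
--             continue
--
--         # 逐部分匹配
--         matched = True
--         for user_part, required_part in zip(user_parts, required_parts):
--             if user_part != "*" and user_part != required_part:
--                 matched = False
--                 break
--
--         if matched:
--             return True
--
--     return False
-- ===== SOURCE B (Python) =====
-- def check_permission_with_wildcard(
--     user_permissions: set[str],
--     required_permission: str,
-- ) -> bool: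
--     # Generate every wildcard pattern that would match the required permission
--     # (each part kept or replaced by "*") and test set membership: O(2^k * k)
--     # lookups instead of scanning the whole permission set.
--     pats = [[]]
--     for part in required_permission.split(":"):
--         pats = [p + [part] for p in pats] + [p + ["*"] for p in pats]
--     return any(":".join(p) in user_permissions for p in pats)
-- ===== Notes on version B (the rewrite author's own statement) =====
-- stated objective: faster
-- what changed: Instead of scanning every user permission and matching it part-by-part against the required permission, B enumerates all 2^k wildcard patterns (k = number of ':'-parts of the required permission, 3 in practice) that could grant it and probes the user's permission set for each.
import Mathlib
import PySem

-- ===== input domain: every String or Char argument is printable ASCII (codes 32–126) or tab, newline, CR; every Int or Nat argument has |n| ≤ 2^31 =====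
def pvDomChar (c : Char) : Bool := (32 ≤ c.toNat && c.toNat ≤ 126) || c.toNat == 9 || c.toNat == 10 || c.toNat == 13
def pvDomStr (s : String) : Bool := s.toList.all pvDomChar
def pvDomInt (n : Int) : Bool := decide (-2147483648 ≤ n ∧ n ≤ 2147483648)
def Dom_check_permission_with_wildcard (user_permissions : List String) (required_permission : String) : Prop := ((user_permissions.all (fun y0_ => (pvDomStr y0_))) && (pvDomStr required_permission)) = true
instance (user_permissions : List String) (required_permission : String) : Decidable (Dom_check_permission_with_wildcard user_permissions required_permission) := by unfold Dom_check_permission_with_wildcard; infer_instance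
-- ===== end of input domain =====

-- B replaces A's scan over the whole permission set (matching each entry part-by-part
-- against the required permission) by enumerating all 2^k wildcard patterns of the
-- required permission and testing membership for each; timing reports the speed-up.

-- s.split(":") — sep is the nonempty literal ":", so PySem.Str.split? never returns none
def pvSplit (s : String) : List String := (PySem.Str.split? s ":").getD []

-- ===== PORT A =====
-- the inner 'for user_part, required_part in zip(...)' loop with its break
def aPairOk : List (String × String) → Bool
  | [] => true
  | (u, r) :: rest => if u ≠ "*" && u ≠ r then false else aPairOk rest

-- the outer 'for user_perm in user_permissions' loop
def aLoop (rparts : List String) : List String → Bool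
  | [] => false
  | u :: rest =>
    let uparts := pvSplit u
    if uparts.length ≠ rparts.length then aLoop rparts rest
    else if aPairOk (uparts.zip rparts) then true
    else aLoop rparts rest

def check_permission_with_wildcard (user_permissions : List String) (required_permission : String) : Bool :=
  if user_permissions.contains required_permission then true
  else aLoop (pvSplit required_permission) user_permissions

-- ===== PORT B =====
-- one step of B's pattern-building loop: keep the part or replace it by "*"
def bStep (pats : List (List String)) (part : String) : List (List String) :=
  pats.map (· ++ [part]) ++ pats.map (· ++ ["*"])

def check_permission_with_wildcard_alt (user_permissions : List String) (required_permission : String) : Bool :=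
  let pats := (pvSplit required_permission).foldl bStep [[]]
  pats.any (fun p => user_permissions.contains (PySem.Str.join ":" p))

-- ===== PRECONDITION & SPEC =====
def Spec_check_permission_with_wildcard (user_permissions : List String) (required_permission : String) (out : Bool) : Prop := out = check_permission_with_wildcard_alt user_permissions required_permission
instance (user_permissions : List String) (required_permission : String) (out : Bool) : Decidable (Spec_check_permission_with_wildcard user_permissions required_permission out) := by unfold Spec_check_permission_with_wildcard; infer_instance

-- ===== CLAIM (what is proved, stated in full; the proofs are below) =====
def Claim_equal_check_permission_with_wildcard : Prop := ∀ (user_permissions : List String) (required_permission : String), Dom_check_permission_with_wildcard user_permissions required_permission → Spec_check_permission_with_wildcard user_permissions required_permission (check_permission_with_wildcard user_permissions required_permission)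

-- ===== LEMMAS AND PROOFS =====

def splitAux (ch : Char) : List Char → List Char → List (List Char)
  | [], cur => [cur.reverse]
  | c :: rest, cur => if c = ch then cur.reverse :: splitAux ch rest [] else splitAux ch rest (c :: cur)

theorem go_spec (ch : Char) : ∀ (l : List Char) (fuel : Nat) (cur : List Char) (acc : List (List Char)),
    l.length < fuel →
    PySem.Chars.splitOn.go [ch] fuel l cur acc = acc.reverse ++ splitAux ch l cur := by
  intro l
  induction l with
  | nil =>
    intro fuel cur acc h
    obtain ⟨f, rfl⟩ : ∃ f, fuel = f + 1 := ⟨fuel - 1, by omega⟩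
    simp [PySem.Chars.splitOn.go, splitAux]
  | cons c rest ih =>
    intro fuel cur acc h
    obtain ⟨f, rfl⟩ : ∃ f, fuel = f + 1 := ⟨fuel - 1, by omega⟩
    simp only [PySem.Chars.splitOn.go]
    by_cases hc : c = ch
    · simp [hc, List.isPrefixOf, splitAux, ih f [] (cur.reverse :: acc) (by simp at h; omega)]
    · simp [List.isPrefixOf, Ne.symm hc, hc, splitAux, ih f (c :: cur) acc (by simp at h; omega)]
theorem pvSplit_eq (s : String) : pvSplit s = (splitAux ':' s.toList []).map String.ofList := by
  simp [pvSplit, PySem.Str.split?, PySem.Chars.split?, PySem.Chars.splitOn,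
    go_spec ':' s.toList (s.length + 1) [] [] (by simp)]

theorem splitAux_ne_nil (ch : Char) (l cur : List Char) : splitAux ch l cur ≠ [] := by
  induction l generalizing cur with
  | nil => simp [splitAux]
  | cons c rest ih => by_cases hc : c = ch <;> simp [splitAux, hc, ih]

theorem join_splitAux (ch : Char) (l cur : List Char) :
    PySem.Chars.join [ch] (splitAux ch l cur) = cur.reverse ++ l := by
  induction l generalizing cur with
  | nil => simp [splitAux, PySem.Chars.join, List.intercalate]
  | cons c rest ih =>
    by_cases hc : c = ch
    · subst hc
      obtain ⟨p, ps, hps⟩ : ∃ p ps, splitAux c rest [] = p :: ps :=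
        match h : splitAux c rest [] with
        | [] => absurd h (splitAux_ne_nil c rest [])
        | p :: ps => ⟨p, ps, rfl⟩
      have := ih (cur := [])
      simp [splitAux, hps, PySem.Chars.join, List.intercalate] at *
      simp [this]
    · have := ih (cur := c :: cur)
      simp [splitAux, hc, PySem.Chars.join] at *
      simp [this]
theorem splitAux_no_sep (ch : Char) (l cur : List Char) (hc : ch ∉ cur) :
    ∀ p ∈ splitAux ch l cur, ch ∉ p := by
  induction l generalizing cur with
  | nil => simpa [splitAux] using hc
  | cons c rest ih =>
    by_cases h : c = ch
    · subst h
      rw [show splitAux c (c :: rest) cur = cur.reverse :: splitAux c rest [] from by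
        simp [splitAux]]
      intro p hp0
      rcases List.mem_cons.mp hp0 with rfl | hp
      · simpa using hc
      · exact ih [] (by simp) p hp
    · simp only [splitAux, if_neg h]
      exact ih (c :: cur) (by simp [hc, Ne.symm h]) 

theorem splitAux_free (ch : Char) (p cur : List Char) (hp : ch ∉ p) :
    splitAux ch p cur = [cur.reverse ++ p] := by
  induction p generalizing cur with
  | nil => simp [splitAux]
  | cons c rest ih =>
    simp only [List.mem_cons, not_or] at hp
    simp [splitAux, Ne.symm hp.1, ih (c :: cur) hp.2]

theorem splitAux_free_append (ch : Char) (p t cur : List Char) (hp : ch ∉ p) :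
    splitAux ch (p ++ ch :: t) cur = (cur.reverse ++ p) :: splitAux ch t [] := by
  induction p generalizing cur with
  | nil => simp [splitAux]
  | cons c rest ih =>
    simp only [List.mem_cons, not_or] at hp
    simp [splitAux, Ne.symm hp.1, ih (c :: cur) hp.2]

theorem splitAux_join (ch : Char) (ps : List (List Char)) (hne : ps ≠ [])
    (hfree : ∀ p ∈ ps, ch ∉ p) :
    splitAux ch (PySem.Chars.join [ch] ps) [] = ps := by
  induction ps with
  | nil => simp at hne
  | cons p ps ih =>
    cases ps with
    | nil => simp [PySem.Chars.join, List.intercalate, splitAux_free ch p [] (hfree p (by simp))]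
    | cons q qs =>
      have hj : PySem.Chars.join [ch] (p :: q :: qs) = p ++ ch :: PySem.Chars.join [ch] (q :: qs) := by
        simp [PySem.Chars.join, List.intercalate, List.intersperse]
      rw [hj, splitAux_free_append ch p _ [] (hfree p (by simp)),
        ih (by simp) (fun r hr => hfree r (List.mem_cons_of_mem _ hr))]
      simp
theorem join_pvSplit (s : String) : PySem.Str.join ":" (pvSplit s) = s := by
  apply String.toList_inj.mp
  rw [pvSplit_eq, PySem.Str.toList_join, List.map_map]
  have : (String.toList ∘ String.ofList) = id := by funext l; simp
  rw [this, List.map_id]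
  simpa using join_splitAux ':' s.toList []

theorem pvSplit_no_colon (s : String) : ∀ p ∈ pvSplit s, ':' ∉ p.toList := by
  rw [pvSplit_eq]
  intro p hp
  rcases List.mem_map.mp hp with ⟨q, hq, rfl⟩
  simpa using splitAux_no_sep ':' s.toList [] (by simp) q hq

theorem pvSplit_ne_nil (s : String) : pvSplit s ≠ [] := by
  rw [pvSplit_eq]
  simpa using splitAux_ne_nil ':' s.toList []

theorem pvSplit_join (ps : List String) (hne : ps ≠ []) (hfree : ∀ p ∈ ps, ':' ∉ p.toList) :
    pvSplit (PySem.Str.join ":" ps) = ps := by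
  rw [pvSplit_eq, PySem.Str.toList_join]
  have h1 : PySem.Chars.join (":".toList) (ps.map String.toList) = PySem.Chars.join [':'] (ps.map String.toList) := rfl
  rw [h1, splitAux_join ':' (ps.map String.toList) (by simpa using hne)
    (by intro p hp; rcases List.mem_map.mp hp with ⟨q, hq, rfl⟩; exact hfree q hq)]
  rw [List.map_map]
  have : (String.ofList ∘ String.toList) = id := by funext l; simp
  rw [this, List.map_id]
def isChoice : List String → List String → Bool
  | [], [] => true
  | c :: cs, r :: rs => (c == r || c == "*") && isChoice cs rs
  | _, _ => false

theorem mem_foldl_bStep (parts : List String) : ∀ (acc : List (List String)) (p : List String),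
    p ∈ parts.foldl bStep acc ↔ ∃ q ∈ acc, ∃ c, isChoice c parts = true ∧ p = q ++ c := by
  induction parts with
  | nil =>
    intro acc p
    constructor
    · intro h; exact ⟨p, h, [], by simp [isChoice]⟩
    · rintro ⟨q, hq, c, hc, rfl⟩
      cases c with
      | nil => simpa using hq
      | cons x xs => simp [isChoice] at hc
  | cons r rs ih =>
    intro acc p
    rw [List.foldl_cons, ih]
    constructor
    · rintro ⟨q', hq', c, hc, rfl⟩
      rcases List.mem_append.mp hq' with h | h <;> rcases List.mem_map.mp h with ⟨q, hq, rfl⟩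
      · exact ⟨q, hq, r :: c, by simp [isChoice, hc]⟩
      · exact ⟨q, hq, "*" :: c, by simp [isChoice, hc]⟩
    · rintro ⟨q, hq, c, hc, rfl⟩
      cases c with
      | nil => simp [isChoice] at hc
      | cons x xs =>
        simp only [isChoice, Bool.and_eq_true, Bool.or_eq_true, beq_iff_eq] at hc
        rcases hc.1 with rfl | rfl
        · refine ⟨q ++ [x], ?_, xs, hc.2, by simp⟩
          simp only [bStep, List.mem_append, List.mem_map]
          exact Or.inl ⟨q, hq, rfl⟩
        · refine ⟨q ++ ["*"], ?_, xs, hc.2, by simp⟩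
          simp only [bStep, List.mem_append, List.mem_map]
          exact Or.inr ⟨q, hq, rfl⟩

theorem aPairOk_eq_isChoice : ∀ (us rs : List String), us.length = rs.length →
    aPairOk (us.zip rs) = isChoice us rs := by
  intro us
  induction us with
  | nil => intro rs h; cases rs <;> simp_all [aPairOk, isChoice]
  | cons u ut ih =>
    intro rs h
    cases rs with
    | nil => simp at h
    | cons r rt =>
      simp only [List.zip_cons_cons, aPairOk, isChoice]
      rw [ih rt (by simpa using h)]
      by_cases h1 : u = "*" <;> by_cases h2 : u = r <;> simp [h1, h2]
theorem isChoice_length : ∀ (cs rs : List String), isChoice cs rs = true → cs.length = rs.length := by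
  intro cs
  induction cs with
  | nil => intro rs h; cases rs <;> simp_all [isChoice]
  | cons c ct ih =>
    intro rs h
    cases rs with
    | nil => simp [isChoice] at h
    | cons r rt =>
      simp only [isChoice, Bool.and_eq_true] at h
      simpa using ih rt h.2

theorem isChoice_refl : ∀ (rs : List String), isChoice rs rs = true := by
  intro rs; induction rs with
  | nil => rfl
  | cons r rt ih => simp [isChoice, ih]

theorem isChoice_free (rs : List String) (hr : ∀ r ∈ rs, ':' ∉ r.toList) :
    ∀ cs, isChoice cs rs = true → ∀ p ∈ cs, ':' ∉ p.toList := by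
  induction rs with
  | nil => intro cs h p hp; cases cs <;> simp_all [isChoice]
  | cons r rt ih =>
    intro cs h p hp
    cases cs with
    | nil => simp at hp
    | cons c ct =>
      simp only [isChoice, Bool.and_eq_true, Bool.or_eq_true, beq_iff_eq] at h
      rcases List.mem_cons.mp hp with rfl | hp'
      · rcases h.1 with rfl | rfl
        · exact hr p (by simp)
        · simp
      · exact ih (fun x hx => hr x (List.mem_cons_of_mem _ hx)) ct h.2 p hp'

theorem match_iff (req u : String) :
    ((pvSplit u).length = (pvSplit req).length ∧ aPairOk ((pvSplit u).zip (pvSplit req)) = true)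
      ↔ ∃ c, isChoice c (pvSplit req) = true ∧ PySem.Str.join ":" c = u := by
  constructor
  · rintro ⟨hlen, hok⟩
    refine ⟨pvSplit u, ?_, join_pvSplit u⟩
    rw [← aPairOk_eq_isChoice _ _ hlen]; exact hok
  · rintro ⟨c, hc, rfl⟩
    have hfree : ∀ p ∈ c, ':' ∉ p.toList := isChoice_free _ (pvSplit_no_colon req) c hc
    have hne : c ≠ [] := by
      intro h; subst h
      have := isChoice_length [] _ hc
      exact pvSplit_ne_nil req (List.length_eq_zero_iff.mp this.symm)
    have hsp : pvSplit (PySem.Str.join ":" c) = c := pvSplit_join c hne hfree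
    rw [hsp]
    exact ⟨isChoice_length _ _ hc, by rw [aPairOk_eq_isChoice _ _ (isChoice_length _ _ hc)]; exact hc⟩

theorem aLoop_any (rp : List String) (ups : List String) :
    aLoop rp ups = ups.any (fun u => (pvSplit u).length == rp.length && aPairOk ((pvSplit u).zip rp)) := by
  induction ups with
  | nil => rfl
  | cons u rest ih =>
    simp only [aLoop, List.any_cons, ← ih]
    by_cases h1 : (pvSplit u).length = rp.length
    · by_cases h2 : aPairOk ((pvSplit u).zip rp) <;> simp [h1, h2]
    · simp [h1]
theorem main (ups : List String) (req : String) :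
    check_permission_with_wildcard ups req = check_permission_with_wildcard_alt ups req := by
  rw [Bool.eq_iff_iff]
  have hA : check_permission_with_wildcard ups req = true ↔
      ∃ u ∈ ups, (pvSplit u).length = (pvSplit req).length ∧
        aPairOk ((pvSplit u).zip (pvSplit req)) = true := by
    unfold check_permission_with_wildcard
    by_cases h : ups.contains req = true
    · rw [if_pos h]
      constructor
      · intro _
        exact ⟨req, List.contains_iff_mem.mp h, rfl,
          by rw [aPairOk_eq_isChoice _ _ rfl]; exact isChoice_refl _⟩
      · intro _; rfl
    · rw [if_neg h, aLoop_any, List.any_eq_true]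
      constructor
      · rintro ⟨u, hu, hm⟩
        simp only [Bool.and_eq_true, beq_iff_eq] at hm
        exact ⟨u, hu, hm.1, hm.2⟩
      · rintro ⟨u, hu, h1, h2⟩
        exact ⟨u, hu, by simp [h1, h2]⟩
  have hB : check_permission_with_wildcard_alt ups req = true ↔
      ∃ c, isChoice c (pvSplit req) = true ∧ (PySem.Str.join ":" c) ∈ ups := by
    unfold check_permission_with_wildcard_alt
    simp only [List.any_eq_true]
    constructor
    · rintro ⟨p, hp, hc⟩
      rcases (mem_foldl_bStep _ _ _).mp hp with ⟨q, hq, c, hic, rfl⟩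
      simp only [List.mem_singleton] at hq; subst hq
      exact ⟨c, hic, List.contains_iff_mem.mp hc⟩
    · rintro ⟨c, hic, hmem⟩
      exact ⟨c, (mem_foldl_bStep _ _ _).mpr ⟨[], by simp, c, hic, by simp⟩,
        List.contains_iff_mem.mpr hmem⟩
  rw [hA, hB]
  constructor
  · rintro ⟨u, hu, hm⟩
    rcases (match_iff req u).mp hm with ⟨c, hic, rfl⟩
    exact ⟨c, hic, hu⟩
  · rintro ⟨c, hic, hmem⟩
    exact ⟨_, hmem, (match_iff req _).mpr ⟨c, hic, rfl⟩⟩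

-- ===== VERDICT (by name: the statement is the Claim_ definition above) =====
theorem check_permission_with_wildcard_spec : Claim_equal_check_permission_with_wildcard := by
  intro ups req _
  unfold Spec_check_permission_with_wildcard
  exact main ups req
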